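-- pv_equiv track=rewrite | github.com/Syuko4omi/textchecker | src/module_wordy/tautological_funcs.py | wrapper_find_tautological_expression
-- ===== SOURCE A (Python) =====
-- def find_tautological_expression(
--     one_sentence: str, tautological_expression_dict: dict[str, list[str]]
-- ) -> list[str]:
--     # 文章中から重複表現を抜き出す
--     tautological_parts = []
--     for key in tautological_expression_dict.keys():
--         if len(one_sentence.split(key)) > 1:  # 重複表現が文章の中にあった場合
--             splitted_parts = one_sentence.split(key)  # その重複表現を境界にして文章を分ける
--             for idx in range(len(splitted_parts)):  # 文中に登場する順序を保ったまま、重複表現を格納する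
--                 tautological_parts.extend(
--                     find_tautological_expression(
--                         splitted_parts[idx], tautological_expression_dict
--                     )
--                 )
--                 if idx != len(splitted_parts) - 1:
--                     tautological_parts.append(key)
--             break
--     return tautological_parts
--
-- def wrapper_find_tautological_expression(
--     one_sentence: str, tautological_expression_dict: dict[str, list[str]]
-- ) -> tuple[list[str], list[str]]:
--     # 重複した言い回しにアラートを出す
--     tautological_expressions = find_tautological_expression(
--         one_sentence, tautological_expression_dict
--     )
--     advice_list = []
--     for tautological_expression in tautological_expressions:
--         alternative_expressions = [
--             f"{item}"
--             for item in tautological_expression_dict[tautological_expression]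
--             if item != ""
--         ]
--         alt_candidates = (
--             "・".join(alternative_expressions)
--             if len(alternative_expressions) != 0
--             else "-"
--         )
--         advice_list.append(f"代替候補： {alt_candidates}")
--     return tautological_expressions, advice_list
-- ===== SOURCE B (Python) =====
-- def wrapper_find_tautological_expression(one_sentence, tautological_expression_dict):
--     # explicit work-stack instead of recursion: items are ("frag", text) to process or ("key", k) to emit
--     taut = []
--     stack = [("frag", one_sentence)]
--     while stack:
--         tag, val = stack.pop()
--         if tag == "key":
--             taut.append(val)
--             continue
--         for key in tautological_expression_dict:
--             parts = val.split(key)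
--             if len(parts) > 1:
--                 items = []
--                 for i, p in enumerate(parts):
--                     items.append(("frag", p))
--                     if i != len(parts) - 1:
--                         items.append(("key", key))
--                 stack.extend(reversed(items))
--                 break
--     advice_list = [
--         "代替候補： "
--         + ("・".join(alts) if len(alts) != 0 else "-")
--         for alts in (
--             [item for item in tautological_expression_dict[t] if item != ""]
--             for t in taut
--         )
--     ]
--     return taut, advice_list
-- ===== Notes on version B (the rewrite author's own statement) =====
-- stated objective: alternative
-- what changed: Replaces A's recursive splitting (recursion into every split fragment) with an explicit work-stack of tagged items (fragment-to-process or key-to-emit) processed iteratively in a single loop; the advice list is built with a comprehension instead of an append loop.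
import Mathlib
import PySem

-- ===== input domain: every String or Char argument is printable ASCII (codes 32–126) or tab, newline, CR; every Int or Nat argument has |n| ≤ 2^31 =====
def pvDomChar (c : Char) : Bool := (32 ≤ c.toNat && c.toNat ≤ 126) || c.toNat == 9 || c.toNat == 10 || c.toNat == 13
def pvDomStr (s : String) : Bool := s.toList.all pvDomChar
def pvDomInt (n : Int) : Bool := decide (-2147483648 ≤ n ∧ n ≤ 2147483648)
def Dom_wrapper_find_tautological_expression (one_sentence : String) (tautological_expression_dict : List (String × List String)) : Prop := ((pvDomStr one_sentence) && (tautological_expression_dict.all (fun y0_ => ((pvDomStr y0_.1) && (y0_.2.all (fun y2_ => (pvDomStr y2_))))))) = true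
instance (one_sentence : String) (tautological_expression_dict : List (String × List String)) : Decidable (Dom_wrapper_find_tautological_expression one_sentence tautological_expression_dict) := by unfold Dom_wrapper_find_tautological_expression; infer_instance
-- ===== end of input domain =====

-- B replaces A's recursive splitting with an explicit work-stack of tagged items (alternative decomposition, same cost).

-- ===== PORT A =====
-- shared helper: dict[key] lookup, first match (KeyError is unreachable here: looked-up keys come from the dict)
def pvLookup (d : List (String × List String)) (k : String) : List String :=
  match d with
  | [] => []
  | (k', v) :: rest => if k' == k then v else pvLookup rest k

-- shared helper: the 'for key in dict: if len(sentence.split(key)) > 1: … break' scan, returning the key and its split.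
-- On an empty key Python's split raises ValueError (excluded by Pre_); split? is none there and the scan moves on.
def pvFirstSplit (s : String) : List (String × List String) → Option (String × List String)
  | [] => none
  | (k, _) :: rest =>
    match PySem.Str.split? s k with
    | some parts => if parts.length > 1 then some (k, parts) else pvFirstSplit s rest
    | none => pvFirstSplit s rest

-- A's recursive helper; fuel = sentence length + 1 always suffices (each split part is strictly shorter)
def find_tautological_expression (fuel : Nat) (one_sentence : String) (tautological_expression_dict : List (String × List String)) : List String :=
  match fuel with
  | 0 => []
  | fuel' + 1 =>
    match pvFirstSplit one_sentence tautological_expression_dict with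
    | none => []
    | some (key, splitted_parts) =>
      (List.range splitted_parts.length).foldl (fun acc idx =>
        let acc2 := acc ++ find_tautological_expression fuel' (splitted_parts.getD idx "") tautological_expression_dict
        if idx ≠ splitted_parts.length - 1 then acc2 ++ [key] else acc2) []

def wrapper_find_tautological_expression (one_sentence : String) (tautological_expression_dict : List (String × List String)) : List String × List String :=
  let tautological_expressions := find_tautological_expression (one_sentence.toList.length + 1) one_sentence tautological_expression_dict
  let advice_list := tautological_expressions.foldl (fun acc t =>
    let alternative_expressions := (pvLookup tautological_expression_dict t).filter (fun item => item ≠ "")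
    let alt_candidates := if alternative_expressions.length ≠ 0 then PySem.Str.join "・" alternative_expressions else "-"
    acc ++ ["代替候補： " ++ alt_candidates]) []
  (tautological_expressions, advice_list)

-- ===== PORT B =====
-- the forward-ordered item list parts[0], KEY, parts[1], …, parts[-1] (Source B builds it and extends the stack with its reverse;
-- here the stack head is the top, so the net stack is this list prepended)
def pvInterleave (k : String) : List String → List (String ⊕ String)
  | [] => []
  | [p] => [Sum.inl p]
  | p :: rest => Sum.inl p :: Sum.inr k :: pvInterleave k rest

-- Source B's while-stack loop; fuel = 3*len+2 always suffices (the stack measure strictly decreases)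
def pvStackLoop (d : List (String × List String)) : Nat → List (String ⊕ String) → List String → List String
  | _, [], taut => taut
  | 0, _ :: _, taut => taut
  | fuel + 1, Sum.inr k :: rest, taut => pvStackLoop d fuel rest (taut ++ [k])
  | fuel + 1, Sum.inl s :: rest, taut =>
    match pvFirstSplit s d with
    | none => pvStackLoop d fuel rest taut
    | some (k, parts) => pvStackLoop d fuel (pvInterleave k parts ++ rest) taut

def wrapper_find_tautological_expression_alt (one_sentence : String) (tautological_expression_dict : List (String × List String)) : List String × List String :=
  let taut := pvStackLoop tautological_expression_dict (3 * one_sentence.toList.length + 2) [Sum.inl one_sentence] []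
  let advice_list := taut.map (fun t =>
    let alts := (pvLookup tautological_expression_dict t).filter (fun item => item ≠ "")
    "代替候補： " ++ (if alts.length ≠ 0 then PySem.Str.join "・" alts else "-"))
  (taut, advice_list)

-- ===== PRECONDITION & SPEC =====
-- Pre_ excludes dicts containing an empty-string key: there Python A (and B) always reach sentence.split('') and raise ValueError.
def Pre_wrapper_find_tautological_expression (one_sentence : String) (tautological_expression_dict : List (String × List String)) : Prop :=
  ∀ kv ∈ tautological_expression_dict, kv.1 ≠ ""
instance (one_sentence : String) (tautological_expression_dict : List (String × List String)) : Decidable (Pre_wrapper_find_tautological_expression one_sentence tautological_expression_dict) := by unfold Pre_wrapper_find_tautological_expression; infer_instance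

def pvWitness_wrapper_find_tautological_expression : String × (List (String × List String)) :=
  ("aa bb aa cc", [("aa", ["x", "y"]), ("cc", [])])

def Spec_wrapper_find_tautological_expression (one_sentence : String) (tautological_expression_dict : List (String × List String)) (out : List String × List String) : Prop := out = wrapper_find_tautological_expression_alt one_sentence tautological_expression_dict
instance (one_sentence : String) (tautological_expression_dict : List (String × List String)) (out : List String × List String) : Decidable (Spec_wrapper_find_tautological_expression one_sentence tautological_expression_dict out) := by unfold Spec_wrapper_find_tautological_expression; infer_instance

-- ===== CLAIM (what is proved, stated in full; the proofs are below) =====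
def Claim_equal_wrapper_find_tautological_expression : Prop := ∀ (one_sentence : String) (tautological_expression_dict : List (String × List String)), Dom_wrapper_find_tautological_expression one_sentence tautological_expression_dict → Pre_wrapper_find_tautological_expression one_sentence tautological_expression_dict → Spec_wrapper_find_tautological_expression one_sentence tautological_expression_dict (wrapper_find_tautological_expression one_sentence tautological_expression_dict)

-- ===== LEMMAS AND PROOFS =====

-- the meaning of one stack item: a fragment contributes A's expressions, a key contributes itself
def pvF (d : List (String × List String)) : String ⊕ String → List String
  | Sum.inl t => find_tautological_expression (t.toList.length + 1) t d
  | Sum.inr k => [k]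

-- stack measure: fragments cost 3*len+1, keys cost 1; it strictly decreases at every loop step
def pvM : List (String ⊕ String) → Nat :=
  fun st => (st.map (fun it => match it with | Sum.inl t => 3 * t.toList.length + 1 | Sum.inr _ => 1)).sum

lemma pvJoin_len (sep : List Char) : ∀ ps : List (List Char), ps ≠ [] →
    (PySem.Chars.join sep ps).length = (ps.map List.length).sum + (ps.length - 1) * sep.length := by
  intro ps
  induction ps with
  | nil => intro h; exact absurd rfl h
  | cons p rest ih =>
    intro _
    cases rest with
    | nil => simp [PySem.Chars.join_singleton]
    | cons q rest' =>
      rw [PySem.Chars.join_cons_cons]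
      have h2 := ih (by simp)
      simp only [List.map_cons, List.sum_cons, List.length_cons, List.length_append,
        Nat.add_sub_cancel, Nat.succ_mul] at *
      omega

lemma pvGo_spec (sep : List Char) (hsep : sep ≠ []) :
    ∀ fuel l cur acc, l.length < fuel →
    ∃ ps, PySem.Chars.splitOn.go sep fuel l cur acc = acc.reverse ++ ps ∧ ps ≠ [] ∧
      PySem.Chars.join sep ps = cur.reverse ++ l := by
  intro fuel
  induction fuel with
  | zero => intro l cur acc h; omega
  | succ fuel ih =>
    intro l cur acc h
    cases l with
    | nil =>
      refine ⟨[cur.reverse], ?_, by simp, by simp [PySem.Chars.join_singleton]⟩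
      rw [PySem.Chars.splitOn.go]
      simp
      omega
    | cons c rest =>
      rw [PySem.Chars.splitOn.go]
      by_cases hp : sep.isPrefixOf (c :: rest) = true
      · simp only [hp, if_true]
        have hpre : sep <+: (c :: rest) := List.isPrefixOf_iff_prefix.mp hp
        have hlen : (List.drop sep.length (c :: rest)).length < fuel := by
          have hs1 : 1 ≤ sep.length := by cases sep with | nil => exact absurd rfl hsep | cons a t => simp
          simp only [List.length_drop, List.length_cons] at *
          omega
        obtain ⟨ps, hgo, hne, hjoin⟩ := ih (List.drop sep.length (c :: rest)) [] (cur.reverse :: acc) hlen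
        refine ⟨cur.reverse :: ps, ?_, by simp, ?_⟩
        · rw [hgo]; simp
        · simp only [List.reverse_nil, List.nil_append] at hjoin
          cases ps with
          | nil => exact absurd rfl hne
          | cons q ps' =>
            rw [PySem.Chars.join_cons_cons]
            have hj2 : PySem.Chars.join sep (q :: ps') = List.drop sep.length (c :: rest) := hjoin
            rw [hj2, List.append_assoc]
            congr 1
            exact List.prefix_iff_eq_append.mp hpre
      · simp only [hp]
        have hlen : rest.length < fuel := by simp at h; omega
        obtain ⟨ps, hgo, hne, hjoin⟩ := ih rest (c :: cur) acc hlen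
        exact ⟨ps, hgo, hne, by rw [hjoin]; simp⟩

-- split facts needed for fuel adequacy and the stack measure
lemma pvSplit_facts {s k : String} {parts : List String} (h : PySem.Str.split? s k = some parts) :
    1 ≤ k.toList.length ∧
    (parts.map (fun p => p.toList.length)).sum + (parts.length - 1) * k.toList.length = s.toList.length := by
  have hb := PySem.Str.split?_map s k
  rw [h] at hb
  rw [PySem.Chars.split?] at hb
  by_cases he : k.toList.isEmpty = true
  · rw [if_pos he] at hb; exact absurd hb (by simp)
  · rw [if_neg he] at hb
    have hkne : k.toList ≠ [] := by simpa [List.isEmpty_iff] using he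
    have hk1 : 1 ≤ k.toList.length := by cases hk : k.toList with | nil => exact absurd hk hkne | cons a t => simp
    refine ⟨hk1, ?_⟩
    rw [PySem.Chars.splitOn] at hb
    obtain ⟨ps, hgo, hne, hjoin⟩ := pvGo_spec k.toList hkne (s.toList.length + 1) s.toList [] [] (by omega)
    rw [hgo] at hb
    simp only [List.reverse_nil, List.nil_append] at hb hjoin
    have hps : ps = parts.map String.toList := by simpa using hb.symm
    have hlen := pvJoin_len k.toList ps hne
    rw [hjoin, hps] at hlen
    simp only [List.map_map, List.length_map] at hlen
    simpa using hlen.symm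

lemma pvFirstSplit_some {s : String} {d : List (String × List String)} {k : String} {parts : List String}
    (h : pvFirstSplit s d = some (k, parts)) :
    PySem.Str.split? s k = some parts ∧ 1 < parts.length := by
  induction d with
  | nil => simp [pvFirstSplit] at h
  | cons kv rest ih =>
    obtain ⟨k', v⟩ := kv
    rw [pvFirstSplit] at h
    cases hs : PySem.Str.split? s k' with
    | none => rw [hs] at h; exact ih h
    | some parts' =>
      rw [hs] at h
      dsimp only at h
      by_cases hl : parts'.length > 1
      · rw [if_pos hl] at h
        obtain ⟨rfl, rfl⟩ : k' = k ∧ parts' = parts := by simpa using h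
        exact ⟨hs, hl⟩
      · rw [if_neg hl] at h; exact ih h

lemma pvSum3 : ∀ parts : List String,
    (parts.map (fun p => 3 * p.toList.length + 1)).sum
      = 3 * (parts.map (fun p => p.toList.length)).sum + parts.length := by
  intro parts
  induction parts with
  | nil => simp
  | cons p rest ih => simp only [List.map_cons, List.sum_cons, List.length_cons, ih]; omega

lemma pvParts_short {s : String} {d : List (String × List String)} {k : String} {parts : List String}
    (h : pvFirstSplit s d = some (k, parts)) :
    (∀ p ∈ parts, p.toList.length < s.toList.length) ∧
    (parts.map (fun p => 3 * p.toList.length + 1)).sum + (parts.length - 1) ≤ 3 * s.toList.length := by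
  obtain ⟨hs, hm⟩ := pvFirstSplit_some h
  obtain ⟨hk1, hsum⟩ := pvSplit_facts hs
  have ht1 : 1 ≤ (parts.length - 1) * k.toList.length :=
    Nat.one_le_iff_ne_zero.mpr (Nat.mul_ne_zero (by omega) (by omega))
  have ht2 : parts.length - 1 ≤ (parts.length - 1) * k.toList.length :=
    Nat.le_mul_of_pos_right _ (by omega)
  constructor
  · intro p hp
    have hmem : p.toList.length ∈ parts.map (fun p => p.toList.length) := List.mem_map_of_mem hp
    have := List.le_sum_of_mem hmem
    omega
  · rw [pvSum3]
    omega

-- the fuel parameter is irrelevant once it exceeds the sentence length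
lemma pvFte_fuel (d : List (String × List String)) :
    ∀ n f1 f2 s, s.toList.length ≤ n → s.toList.length < f1 → s.toList.length < f2 →
    find_tautological_expression f1 s d = find_tautological_expression f2 s d := by
  intro n
  induction n with
  | zero =>
    intro f1 f2 s hn h1 h2
    obtain ⟨a, rfl⟩ : ∃ a, f1 = a + 1 := ⟨f1 - 1, by omega⟩
    obtain ⟨b, rfl⟩ : ∃ b, f2 = b + 1 := ⟨f2 - 1, by omega⟩
    rw [find_tautological_expression, find_tautological_expression]
    cases hfs : pvFirstSplit s d with
    | none => rfl
    | some kp =>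
      obtain ⟨k, parts⟩ := kp
      obtain ⟨hlt, _⟩ := pvParts_short hfs
      obtain ⟨hsp, hm⟩ := pvFirstSplit_some hfs
      obtain ⟨p, hp⟩ : ∃ p, p ∈ parts := by cases parts with | nil => simp at hm | cons a t => exact ⟨a, by simp⟩
      have := hlt p hp
      omega
  | succ n ih =>
    intro f1 f2 s hn h1 h2
    obtain ⟨a, rfl⟩ : ∃ a, f1 = a + 1 := ⟨f1 - 1, by omega⟩
    obtain ⟨b, rfl⟩ : ∃ b, f2 = b + 1 := ⟨f2 - 1, by omega⟩
    rw [find_tautological_expression, find_tautological_expression]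
    cases hfs : pvFirstSplit s d with
    | none => rfl
    | some kp =>
      obtain ⟨k, parts⟩ := kp
      obtain ⟨hlt, _⟩ := pvParts_short hfs
      refine PySem.List.foldl_congr_mem _ _ _ _ ?_
      intro acc x hx
      have hxm : x < parts.length := List.mem_range.mp hx
      have hget : parts.getD x "" = parts[x] := List.getD_eq_getElem parts "" hxm
      have hpmem : parts[x] ∈ parts := List.getElem_mem hxm
      have hplen := hlt _ hpmem
      have : find_tautological_expression a (parts.getD x "") d
           = find_tautological_expression b (parts.getD x "") d := by
        rw [hget]
        exact ih a b parts[x] (by omega) (by omega) (by omega)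
      simp only [this]

lemma pvRangeAux {s : String} {d : List (String × List String)} {k : String} {parts : List String}
    (h : pvFirstSplit s d = some (k, parts)) :
    ∀ (ps : List String) (i : Nat), i + ps.length = parts.length → parts.drop i = ps →
    (List.range' i ps.length).flatMap (fun idx =>
        find_tautological_expression s.toList.length (parts.getD idx "") d
          ++ (if idx ≠ parts.length - 1 then [k] else []))
      = (pvInterleave k ps).flatMap (pvF d) := by
  intro ps
  induction ps with
  | nil => intro i _ _; simp [pvInterleave]
  | cons p rest ih =>
    intro i hlen hdrop
    have hget : parts.getD i "" = p := by
      have h0 : (parts.drop i)[0]? = some p := by rw [hdrop]; rfl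
      rw [List.getElem?_drop] at h0
      simp only [List.getD_eq_getElem?_getD, Nat.add_zero] at h0 ⊢
      rw [h0]; rfl
    have hpm : p ∈ parts := (List.drop_suffix i parts).subset (by rw [hdrop]; simp)
    obtain ⟨hlt, _⟩ := pvParts_short h
    have hfuel : find_tautological_expression s.toList.length p d
        = find_tautological_expression (p.toList.length + 1) p d :=
      pvFte_fuel d p.toList.length _ _ p (le_refl _) (hlt p hpm) (by omega)
    simp only [List.length_cons]
    rw [List.range'_succ]
    cases rest with
    | nil =>
      have hnei : ¬ (i ≠ parts.length - 1) := by
        simp only [List.length_cons, List.length_nil] at hlen; omega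
      simp only [List.length_nil, List.range'_zero, List.flatMap_cons, List.flatMap_nil,
        List.append_nil, pvInterleave, pvF]
      rw [hget, if_neg hnei, hfuel]
      simp
    | cons q rest' =>
      have hnei : i ≠ parts.length - 1 := by
        simp only [List.length_cons] at hlen; omega
      have hdrop' : parts.drop (i + 1) = q :: rest' := by rw [← List.tail_drop, hdrop]; rfl
      have hih := ih (i + 1) (by simp only [List.length_cons] at hlen ⊢; omega) hdrop'
      simp only [List.flatMap_cons, pvInterleave, pvF]
      rw [hget, if_pos hnei, hfuel, hih]
      simp

-- one unfolding of A's recursion as the flatMap of the interleaved item list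
lemma pvFte_unfold {s : String} {d : List (String × List String)} {k : String} {parts : List String}
    (h : pvFirstSplit s d = some (k, parts)) :
    find_tautological_expression (s.toList.length + 1) s d = (pvInterleave k parts).flatMap (pvF d) := by
  rw [find_tautological_expression, h]
  dsimp only
  rw [PySem.List.foldl_congr_mem (List.range parts.length) _
      (fun (acc : List String) idx => acc ++
        (find_tautological_expression s.toList.length (parts.getD idx "") d
          ++ (if idx ≠ parts.length - 1 then [k] else []))) []
      (by intro acc x _; by_cases hx : x ≠ parts.length - 1 <;> simp [hx])]
  rw [PySem.List.foldl_append_eq_flatMap, List.range_eq_range']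
  simpa using pvRangeAux h parts 0 (by simp) (by simp)

lemma pvM_interleave (k : String) : ∀ parts : List String, parts ≠ [] →
    pvM (pvInterleave k parts) = (parts.map (fun p => 3 * p.toList.length + 1)).sum + (parts.length - 1) := by
  intro parts
  induction parts with
  | nil => intro h; exact absurd rfl h
  | cons p rest ih =>
    intro _
    cases rest with
    | nil => simp [pvInterleave, pvM]
    | cons q rest' =>
      have h2 := ih (by simp)
      simp only [pvInterleave, pvM, List.map_cons, List.sum_cons, List.length_cons] at h2 ⊢
      omega

-- the loop invariant: B's stack loop computes the concatenated meaning of all stack items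
lemma pvLoop_spec (d : List (String × List String)) :
    ∀ fuel stack taut, pvM stack < fuel →
    pvStackLoop d fuel stack taut = taut ++ stack.flatMap (pvF d) := by
  intro fuel
  induction fuel with
  | zero => intro stack taut h; omega
  | succ fuel ih =>
    intro stack taut h
    cases stack with
    | nil => simp [pvStackLoop]
    | cons it rest =>
      cases it with
      | inr k =>
        rw [pvStackLoop, ih rest (taut ++ [k]) (by simp [pvM] at h ⊢; omega)]
        simp [pvF]
      | inl s =>
        rw [pvStackLoop]
        cases hfs : pvFirstSplit s d with
        | none =>
          dsimp only
          rw [ih rest taut (by simp [pvM] at h ⊢; omega)]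
          have hF : pvF d (Sum.inl s) = [] := by
            simp only [pvF, find_tautological_expression, hfs]
          simp [hF]
        | some kp =>
          obtain ⟨k, parts⟩ := kp
          dsimp only
          obtain ⟨_, hmeas⟩ := pvParts_short hfs
          obtain ⟨_, hm⟩ := pvFirstSplit_some hfs
          have hne : parts ≠ [] := by cases parts with | nil => simp at hm | cons a t => simp
          have hMit : pvM (pvInterleave k parts) ≤ 3 * s.toList.length := by
            rw [pvM_interleave k parts hne]; omega
          have hMapp : pvM (pvInterleave k parts ++ rest) = pvM (pvInterleave k parts) + pvM rest := by
            simp [pvM]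
          have hMs : pvM (Sum.inl s :: rest) = 3 * s.toList.length + 1 + pvM rest := by
            simp [pvM]
          rw [ih (pvInterleave k parts ++ rest) taut (by rw [hMapp]; rw [hMs] at h; omega)]
          have hF : pvF d (Sum.inl s) = (pvInterleave k parts).flatMap (pvF d) := pvFte_unfold hfs
          simp [hF]

-- ===== VERDICT (by name: the statement is the Claim_ definition above) =====
theorem wrapper_find_tautological_expression_spec : Claim_equal_wrapper_find_tautological_expression := by
  intro s d _hDom _hPre
  unfold Spec_wrapper_find_tautological_expression
  unfold wrapper_find_tautological_expression wrapper_find_tautological_expression_alt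
  have hM : pvM [Sum.inl s] < 3 * s.toList.length + 2 := by
    simp only [pvM, List.map_cons, List.map_nil, List.sum_cons, List.sum_nil]; omega
  have hloop : pvStackLoop d (3 * s.toList.length + 2) [Sum.inl s] [] =
      find_tautological_expression (s.toList.length + 1) s d := by
    rw [pvLoop_spec d _ _ _ hM]
    simp [pvF]
  rw [hloop]
  simp only [PySem.List.foldl_append_singleton_eq_map, List.nil_append]
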